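-- pv_equiv track=rewrite | github.com/RedHatQE/openshift-python-wrapper | test_utils/fake_dynamic_client.py | _filter_by_labels
-- ===== SOURCE A (Python) =====
-- def _filter_by_labels(resources, label_selector):
--     """Filter resources by label selector"""
--     if not label_selector:
--         return resources
--
--     # Parse label selector (simple implementation)
--     # Supports: key=value, key!=value, key in (value1,value2), key notin (value1,value2)
--     selectors = []
--     for selector in label_selector.split(","):
--         selector = selector.strip()
--         if "=" in selector and "!=" not in selector:
--             key, value = selector.split("=", 1)
--             selectors.append(("eq", key.strip(), value.strip()))
--         elif "!=" in selector:
--             key, value = selector.split("!=", 1)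
--             selectors.append(("ne", key.strip(), value.strip()))
--         # Add more complex selectors as needed
--
--     filtered_resources = []
--     for resource in resources:
--         labels = resource.get("metadata", {}).get("labels", {})
--         match = True
--
--         for op, key, value in selectors:
--             if op == "eq":
--                 if labels.get(key) != value:
--                     match = False
--                     break
--             elif op == "ne":
--                 if labels.get(key) == value:
--                     match = False
--                     break
--
--         if match:
--             filtered_resources.append(resource)
--
--     return filtered_resources
-- ===== SOURCE B (Python) =====
-- def _filter_by_labels(resources, label_selector):
--     """Filter resources by label selector (staged sieve: one filtering pass per selector)."""
--     remaining = list(resources)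
--     for raw in label_selector.split(","):
--         s = raw.strip()
--         if "!=" in s:
--             key, value = s.split("!=", 1)
--             key, value = key.strip(), value.strip()
--             remaining = [r for r in remaining
--                          if r.get("metadata", {}).get("labels", {}).get(key) != value]
--         elif "=" in s:
--             key, value = s.split("=", 1)
--             key, value = key.strip(), value.strip()
--             remaining = [r for r in remaining
--                          if r.get("metadata", {}).get("labels", {}).get(key) == value]
--     return remaining
-- ===== Notes on version B (the rewrite author's own statement) =====
-- stated objective: alternative
-- what changed: B swaps the loop nesting: instead of parsing selectors into a list once and testing every resource against all of them with a match/break flag, it performs one filtering pass over the surviving resources per selector (staged sieve), testing the '!=' branch first (correct since '!=' in s implies '=' in s) and dropping the empty-selector early return.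
import Mathlib
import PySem

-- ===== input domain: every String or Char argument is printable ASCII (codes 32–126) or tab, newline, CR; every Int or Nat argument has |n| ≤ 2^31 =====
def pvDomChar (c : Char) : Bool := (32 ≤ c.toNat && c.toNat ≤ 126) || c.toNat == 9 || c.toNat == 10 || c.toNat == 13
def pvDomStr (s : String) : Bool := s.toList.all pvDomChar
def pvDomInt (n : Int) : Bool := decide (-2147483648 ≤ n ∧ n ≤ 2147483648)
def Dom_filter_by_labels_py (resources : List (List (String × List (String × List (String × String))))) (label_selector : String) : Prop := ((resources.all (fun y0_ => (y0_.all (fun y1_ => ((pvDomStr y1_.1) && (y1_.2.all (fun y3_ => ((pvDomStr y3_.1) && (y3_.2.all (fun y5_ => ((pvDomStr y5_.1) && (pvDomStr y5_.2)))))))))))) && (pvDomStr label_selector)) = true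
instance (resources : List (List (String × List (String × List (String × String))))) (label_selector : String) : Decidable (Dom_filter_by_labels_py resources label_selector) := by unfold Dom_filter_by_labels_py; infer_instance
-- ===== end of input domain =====

-- B swaps the loop nesting: one filtering pass over the surviving resources per selector
-- (staged sieve) instead of A's parse-then-match/break loop per resource (alternative; no speed claim).

-- ===== PORT A =====
-- resource.get("metadata", {}).get("labels", {}) — shared tiny accessor
def pvLabels (resource : List (String × List (String × List (String × String)))) : PySem.Dict String String :=
  PySem.Dict.mk ((PySem.Dict.mk ((PySem.Dict.mk resource).getD "metadata" [])).getD "labels" [])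

-- A's parse loop: list of ("eq"/"ne", key, value) tuples.
-- (Python binds `selector = selector.strip()` once; the port writes that stripped value out at each use.)
def pvASelectors (label_selector : String) : List (String × String × String) :=
  ((PySem.Str.split? label_selector ",").getD []).foldl (fun acc selector =>
    if PySem.Str.isIn "=" (PySem.Str.strip selector) && !(PySem.Str.isIn "!=" (PySem.Str.strip selector)) then
      -- key, value = selector.split("=", 1): the guard guarantees two parts, so the [] fallback is unreachable
      match (PySem.Str.splitMax? (PySem.Str.strip selector) "=" 1).getD [] with
      | k :: v :: _ => acc ++ [("eq", PySem.Str.strip k, PySem.Str.strip v)]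
      | _ => acc
    else if PySem.Str.isIn "!=" (PySem.Str.strip selector) then
      match (PySem.Str.splitMax? (PySem.Str.strip selector) "!=" 1).getD [] with
      | k :: v :: _ => acc ++ [("ne", PySem.Str.strip k, PySem.Str.strip v)]
      | _ => acc
    else acc) []

-- A's inner loop with its `break`: structural recursion over the selector tuples
def pvAMatch (labels : PySem.Dict String String) : List (String × String × String) → Bool
  | [] => true
  | (op, key, value) :: rest =>
    if op == "eq" then
      if labels.get? key ≠ some value then false else pvAMatch labels rest
    else if op == "ne" then
      if labels.get? key = some value then false else pvAMatch labels rest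
    else pvAMatch labels rest

def filter_by_labels_py (resources : List (List (String × List (String × List (String × String))))) (label_selector : String) : List (List (String × List (String × List (String × String)))) :=
  if label_selector = "" then resources
  else
    let selectors := pvASelectors label_selector
    resources.foldl (fun acc resource =>
      if pvAMatch (pvLabels resource) selectors then acc ++ [resource] else acc) []

-- ===== PORT B =====
-- one iteration of B's selector loop: filter the surviving resources by this selector
def pvBStep (remaining : List (List (String × List (String × List (String × String))))) (raw : String) : List (List (String × List (String × List (String × String)))) :=
  if PySem.Str.isIn "!=" (PySem.Str.strip raw) then
    match (PySem.Str.splitMax? (PySem.Str.strip raw) "!=" 1).getD [] with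
    | k :: v :: _ => remaining.filter (fun r =>
        !((pvLabels r).get? (PySem.Str.strip k) == some (PySem.Str.strip v)))
    | _ => remaining
  else if PySem.Str.isIn "=" (PySem.Str.strip raw) then
    match (PySem.Str.splitMax? (PySem.Str.strip raw) "=" 1).getD [] with
    | k :: v :: _ => remaining.filter (fun r =>
        (pvLabels r).get? (PySem.Str.strip k) == some (PySem.Str.strip v))
    | _ => remaining
  else remaining

def filter_by_labels_py_alt (resources : List (List (String × List (String × List (String × String))))) (label_selector : String) : List (List (String × List (String × List (String × String)))) :=
  ((PySem.Str.split? label_selector ",").getD []).foldl pvBStep resources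

-- ===== PRECONDITION & SPEC =====
def Spec_filter_by_labels_py (resources : List (List (String × List (String × List (String × String))))) (label_selector : String) (out : List (List (String × List (String × List (String × String))))) : Prop := out = filter_by_labels_py_alt resources label_selector
instance (resources : List (List (String × List (String × List (String × String))))) (label_selector : String) (out : List (List (String × List (String × List (String × String))))) : Decidable (Spec_filter_by_labels_py resources label_selector out) := by
  unfold Spec_filter_by_labels_py
  letI d1 : DecidableEq (List (String × String)) := inferInstance
  letI d2 : DecidableEq (List (String × List (String × String))) := inferInstance
  letI d3 : DecidableEq (List (String × List (String × List (String × String)))) := inferInstance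
  letI d4 : DecidableEq (List (List (String × List (String × List (String × String))))) := inferInstance
  exact d4 out (filter_by_labels_py_alt resources label_selector)

-- ===== CLAIM (what is proved, stated in full; the proofs are below) =====
def Claim_equal_filter_by_labels_py : Prop := ∀ (resources : List (List (String × List (String × List (String × String))))) (label_selector : String), Dom_filter_by_labels_py resources label_selector → Spec_filter_by_labels_py resources label_selector (filter_by_labels_py resources label_selector)

-- ===== LEMMAS AND PROOFS =====

-- the tuples one comma-piece contributes to A's selector list
def pvGA (selector : String) : List (String × String × String) :=
  if PySem.Str.isIn "=" (PySem.Str.strip selector) && !(PySem.Str.isIn "!=" (PySem.Str.strip selector)) then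
    match (PySem.Str.splitMax? (PySem.Str.strip selector) "=" 1).getD [] with
    | k :: v :: _ => [("eq", PySem.Str.strip k, PySem.Str.strip v)]
    | _ => []
  else if PySem.Str.isIn "!=" (PySem.Str.strip selector) then
    match (PySem.Str.splitMax? (PySem.Str.strip selector) "!=" 1).getD [] with
    | k :: v :: _ => [("ne", PySem.Str.strip k, PySem.Str.strip v)]
    | _ => []
  else []

theorem pvASelectors_eq_flatMap (ls : String) :
    pvASelectors ls = ((PySem.Str.split? ls ",").getD []).flatMap pvGA := by
  have h : ∀ (acc : List (String × String × String)) (selector : String),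
      (if PySem.Str.isIn "=" (PySem.Str.strip selector) && !(PySem.Str.isIn "!=" (PySem.Str.strip selector)) then
        match (PySem.Str.splitMax? (PySem.Str.strip selector) "=" 1).getD [] with
        | k :: v :: _ => acc ++ [("eq", PySem.Str.strip k, PySem.Str.strip v)]
        | _ => acc
      else if PySem.Str.isIn "!=" (PySem.Str.strip selector) then
        match (PySem.Str.splitMax? (PySem.Str.strip selector) "!=" 1).getD [] with
        | k :: v :: _ => acc ++ [("ne", PySem.Str.strip k, PySem.Str.strip v)]
        | _ => acc
      else acc) = acc ++ pvGA selector := by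
    intro acc selector
    delta pvGA
    split_ifs
    · split
      · rfl
      · rw [List.append_nil]
    · split
      · rfl
      · rw [List.append_nil]
    · rw [List.append_nil]
  calc pvASelectors ls
      = ((PySem.Str.split? ls ",").getD []).foldl (fun acc selector => acc ++ pvGA selector) [] := by
        delta pvASelectors
        rw [funext fun acc => funext fun selector => h acc selector]
    _ = _ := by rw [PySem.List.foldl_append_eq_flatMap, List.nil_append]

theorem pvAMatch_append (labels : PySem.Dict String String) (l1 l2 : List (String × String × String)) :
    pvAMatch labels (l1 ++ l2) = (pvAMatch labels l1 && pvAMatch labels l2) := by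
  induction l1 with
  | nil => simp [pvAMatch]
  | cons hd t ih =>
    obtain ⟨op, key, value⟩ := hd
    simp only [List.cons_append, pvAMatch]
    split_ifs <;> simp [ih]

-- one step of B's sieve is exactly a filter by A's predicate for that piece
theorem pvBStep_eq_filter (remaining : List (List (String × List (String × List (String × String))))) (raw : String) :
    pvBStep remaining raw = remaining.filter (fun r => pvAMatch (pvLabels r) (pvGA raw)) := by
  delta pvBStep pvGA
  cases hb : PySem.Str.isIn "!=" (PySem.Str.strip raw) with
  | true =>
    -- A's first guard "=" ∧ ¬"!=" is false, its elif "!=" is true: both sides take the ne branch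
    simp only [Bool.not_true, Bool.and_false, Bool.false_eq_true, if_false, if_true]
    split
    · rename_i k v tl _
      apply List.filter_congr
      intro r _
      by_cases hx : (pvLabels r).get? (PySem.Str.strip k) = some (PySem.Str.strip v) <;>
        simp [pvAMatch, hx]
    · simp [pvAMatch]
  | false =>
    cases ha : PySem.Str.isIn "=" (PySem.Str.strip raw) with
    | true =>
      simp only [Bool.not_false, Bool.and_true, Bool.false_eq_true, if_false, if_true]
      split
      · rename_i k v tl _
        apply List.filter_congr
        intro r _
        by_cases hx : (pvLabels r).get? (PySem.Str.strip k) = some (PySem.Str.strip v) <;>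
          simp [pvAMatch, hx]
      · simp [pvAMatch]
    | false =>
      simp only [Bool.not_false, Bool.and_true, Bool.false_eq_true, if_false]
      simp [pvAMatch]

-- B's whole selector loop is a single filter by A's full predicate
theorem pvBFold_eq_filter (L : List String) (acc : List (List (String × List (String × List (String × String))))) :
    L.foldl pvBStep acc = acc.filter (fun r => pvAMatch (pvLabels r) (L.flatMap pvGA)) := by
  induction L generalizing acc with
  | nil => simp [pvAMatch]
  | cons s t ih =>
    rw [List.foldl_cons, pvBStep_eq_filter, ih, List.filter_filter]
    simp only [List.flatMap_cons]
    apply List.filter_congr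
    intro r _
    rw [pvAMatch_append, Bool.and_comm]

-- ===== VERDICT (by name: the statement is the Claim_ definition above) =====
theorem filter_by_labels_py_spec : Claim_equal_filter_by_labels_py := by
  intro resources ls _
  unfold Spec_filter_by_labels_py filter_by_labels_py filter_by_labels_py_alt
  rw [pvBFold_eq_filter, ← pvASelectors_eq_flatMap]
  by_cases hls : ls = ""
  · subst hls
    have h0 : pvASelectors "" = [] := by decide
    simp [h0, pvAMatch]
  · simp only [hls, if_false]
    rw [PySem.List.foldl_append_if_eq_filter]
    simp only [List.nil_append]
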